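-- pv_equiv track=rewrite | github.com/jinha2536/mdm-arithmetic | diffusion-arithmetic/experiments/exp_tree.py | segment_accuracy
-- ===== SOURCE A (Python) =====
-- ND          = 3           # digits per operand (100–999)
--
-- ANS_WIDTH   = 4           # digits per answer (zero-padded; max 1998)
--
-- def answer_offsets_in_region(k):
--     """
--     Compute where each segment's answer digits fall within the
--     answer region (everything after the first '=').
--
--     Answer region for k=2: '0570|854+204=1058'
--       seg0 answer at offset 0..3 (ANS_WIDTH chars)
--       seg1 answer at offset 4+8=12..15 (after '|854+204=')
--
--     Returns list of (start, end) pairs into the answer region string.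
--     """
--     offsets = []
--     # First segment answer starts at offset 0
--     offsets.append((0, ANS_WIDTH))
--     # Subsequent segments: each preceded by '|' + problem + '='
--     # problem = 'XXX+YYY' = 2*ND+1 chars, plus '|' and '='
--     inter = 1 + (2 * ND + 1) + 1  # |XXX+YYY=
--     pos = ANS_WIDTH
--     for _ in range(1, k):
--         pos += inter
--         offsets.append((pos, pos + ANS_WIDTH))
--         pos += ANS_WIDTH
--     return offsets
--
-- def segment_accuracy(pred_ans_region, gold_ans_region, k):
--     """
--     Per-segment exact match from the answer region string.
--     The answer region is '0570|854+204=1058' (interleaved format).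
--     Extract answer digits at known offsets.
--     """
--     offsets = answer_offsets_in_region(k)
--     results = []
--     for start, end in offsets:
--         pred_seg = pred_ans_region[start:end] \
--             if end <= len(pred_ans_region) else ''
--         gold_seg = gold_ans_region[start:end] \
--             if end <= len(gold_ans_region) else ''
--         results.append(pred_seg == gold_seg)
--     return results
-- ===== SOURCE B (Python) =====
-- ND = 3
-- ANS_WIDTH = 4
--
-- def segment_accuracy(pred_ans_region, gold_ans_region, k):
--     # Closed-form offsets: segment i's answer starts at i*stride (stride = 13),
--     # computed directly in one pass -- no offset table, no running position.
--     # The first segment is always checked (as in the original), hence max(1, k).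
--     stride = ANS_WIDTH + 2 * ND + 3  # '|XXX+YYY=' separator + answer width
--     n_p = len(pred_ans_region)
--     n_g = len(gold_ans_region)
--     return [
--         (pred_ans_region[i * stride:i * stride + ANS_WIDTH]
--          if i * stride + ANS_WIDTH <= n_p else '')
--         == (gold_ans_region[i * stride:i * stride + ANS_WIDTH]
--             if i * stride + ANS_WIDTH <= n_g else '')
--         for i in range(max(1, k))
--     ]
-- ===== Notes on version B (the rewrite author's own statement) =====
-- stated objective: faster
-- what changed: Replaces the separate offset-table-building pass with its running position accumulator by a single comprehension over range(max(1,k)) using the closed-form start index i*13 per segment (one pass, no intermediate tuple list; max(1,k) keeps the original's always-checked first segment).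
import Mathlib
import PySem

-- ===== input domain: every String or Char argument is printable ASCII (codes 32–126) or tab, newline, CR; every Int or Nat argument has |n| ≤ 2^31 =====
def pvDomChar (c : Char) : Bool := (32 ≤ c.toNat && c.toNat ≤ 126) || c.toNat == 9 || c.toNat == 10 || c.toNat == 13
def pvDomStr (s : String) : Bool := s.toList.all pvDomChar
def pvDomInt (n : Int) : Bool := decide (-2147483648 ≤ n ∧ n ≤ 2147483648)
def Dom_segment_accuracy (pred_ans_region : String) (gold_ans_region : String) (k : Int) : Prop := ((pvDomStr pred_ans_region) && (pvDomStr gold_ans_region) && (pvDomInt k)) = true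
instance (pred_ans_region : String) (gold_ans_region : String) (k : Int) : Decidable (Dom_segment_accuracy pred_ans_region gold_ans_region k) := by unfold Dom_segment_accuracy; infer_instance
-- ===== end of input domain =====

-- B inlines the offset table into one comprehension over range(max(1,k)) with the
-- closed-form start index i*13 (simpler: no offset-table pass, no running position).


-- ===== PORT A =====
def pvND : Int := 3
def pvANS_WIDTH : Int := 4

def answer_offsets_in_region (k : Int) : List (Int × Int) :=
  let offsets : List (Int × Int) := [] ++ [((0 : Int), pvANS_WIDTH)]
  let inter : Int := 1 + (2 * pvND + 1) + 1
  let st := (PySem.List.pyRange 1 k 1).foldl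
    (fun (st : List (Int × Int) × Int) _ =>
      let pos := st.2 + inter
      (st.1 ++ [(pos, pos + pvANS_WIDTH)], pos + pvANS_WIDTH))
    (offsets, pvANS_WIDTH)
  st.1

def segment_accuracy (pred_ans_region : String) (gold_ans_region : String) (k : Int) : List Bool :=
  (answer_offsets_in_region k).foldl
    (fun results (se : Int × Int) =>
      let pred_seg := if se.2 ≤ PySem.Str.len pred_ans_region
        then PySem.Str.slice pred_ans_region (some se.1) (some se.2) else ""
      let gold_seg := if se.2 ≤ PySem.Str.len gold_ans_region
        then PySem.Str.slice gold_ans_region (some se.1) (some se.2) else ""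
      results ++ [pred_seg == gold_seg]) []

-- ===== PORT B =====
def segment_accuracy_alt (pred_ans_region : String) (gold_ans_region : String) (k : Int) : List Bool :=
  let stride : Int := pvANS_WIDTH + 2 * pvND + 3
  let n_p := PySem.Str.len pred_ans_region
  let n_g := PySem.Str.len gold_ans_region
  (PySem.List.pyRange 0 (max 1 k) 1).map (fun i =>
    (if i * stride + pvANS_WIDTH ≤ n_p
      then PySem.Str.slice pred_ans_region (some (i * stride)) (some (i * stride + pvANS_WIDTH)) else "")
    == (if i * stride + pvANS_WIDTH ≤ n_g
      then PySem.Str.slice gold_ans_region (some (i * stride)) (some (i * stride + pvANS_WIDTH)) else ""))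

-- ===== PRECONDITION & SPEC =====
def Spec_segment_accuracy (pred_ans_region : String) (gold_ans_region : String) (k : Int) (out : List Bool) : Prop := out = segment_accuracy_alt pred_ans_region gold_ans_region k
instance (pred_ans_region : String) (gold_ans_region : String) (k : Int) (out : List Bool) : Decidable (Spec_segment_accuracy pred_ans_region gold_ans_region k out) := by unfold Spec_segment_accuracy; infer_instance

-- ===== CLAIM (what is proved, stated in full; the proofs are below) =====
def Claim_equal_segment_accuracy : Prop := ∀ (pred_ans_region : String) (gold_ans_region : String) (k : Int), Dom_segment_accuracy pred_ans_region gold_ans_region k → Spec_segment_accuracy pred_ans_region gold_ans_region k (segment_accuracy pred_ans_region gold_ans_region k)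

-- ===== LEMMAS AND PROOFS =====

-- A's offset loop with its running position accumulator produces exactly the closed-form table.
theorem offsets_state (n : Nat) :
    (PySem.List.pyRange 1 ((n : Int) + 1) 1).foldl
      (fun (st : List (Int × Int) × Int) _ =>
        let pos := st.2 + (1 + (2 * pvND + 1) + 1)
        (st.1 ++ [(pos, pos + pvANS_WIDTH)], pos + pvANS_WIDTH))
      ([((0 : Int), pvANS_WIDTH)], pvANS_WIDTH)
    = ((PySem.List.pyRange 0 ((n : Int) + 1) 1).map (fun i => (13 * i, 13 * i + 4)),
       13 * (n : Int) + 4) := by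
  induction n with
  | zero =>
    rw [PySem.List.pyRange_one_eq_nil (by norm_num),
        PySem.List.pyRange_one_cons (by norm_num : (0 : Int) < ((0 : Nat) : Int) + 1),
        PySem.List.pyRange_one_eq_nil (by norm_num)]
    simp [pvANS_WIDTH]
  | succ m ih =>
    have h1 : ((m + 1 : Nat) : Int) + 1 = ((m : Int) + 1) + 1 := by push_cast; ring
    rw [h1, PySem.List.pyRange_one_succ_right (by omega : (1:Int) ≤ (m:Int)+1),
        PySem.List.pyRange_one_succ_right (by omega : (0:Int) ≤ (m:Int)+1),
        List.foldl_append, ih]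
    simp only [List.foldl_cons, List.foldl_nil, List.map_append, List.map_cons, List.map_nil,
               Prod.mk.injEq, pvND, pvANS_WIDTH]
    refine ⟨?_, by push_cast; ring⟩
    congr 1

-- For every k (the first segment is unconditional), the offsets are the closed-form table
-- with max 1 k entries.
theorem offsets_closed_form (k : Int) :
    answer_offsets_in_region k
      = (PySem.List.pyRange 0 (max 1 k) 1).map (fun i => (13 * i, 13 * i + 4)) := by
  by_cases hk : 1 ≤ k
  · obtain ⟨n, rfl⟩ : ∃ n : Nat, k = (n : Int) + 1 := ⟨(k - 1).toNat, by omega⟩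
    rw [max_eq_right hk]
    unfold answer_offsets_in_region
    simp only [List.nil_append]
    rw [offsets_state n]
  · rw [max_eq_left (by omega)]
    unfold answer_offsets_in_region
    rw [PySem.List.pyRange_one_eq_nil (by omega),
        PySem.List.pyRange_one_cons (by norm_num : (0 : Int) < 1),
        PySem.List.pyRange_one_eq_nil (by norm_num)]
    simp [pvANS_WIDTH]

theorem foldl_concat {α β : Type} (g : α → β) (l : List α) (init : List β) :
    l.foldl (fun acc x => acc ++ [g x]) init = init ++ l.map g := by
  induction l generalizing init with
  | nil => simp
  | cons x xs ih => simp [ih]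

-- ===== VERDICT (by name: the statement is the Claim_ definition above) =====
theorem segment_accuracy_spec : Claim_equal_segment_accuracy := by
  intro pred gold k _hdom
  unfold Spec_segment_accuracy segment_accuracy segment_accuracy_alt
  rw [offsets_closed_form k, List.foldl_map, foldl_concat]
  simp only [List.nil_append]
  apply List.map_congr_left
  intro i _
  have h13 : 13 * i = i * (pvANS_WIDTH + 2 * pvND + 3) := by
    simp [pvANS_WIDTH, pvND]; ring
  simp only [pvANS_WIDTH, pvND] at h13 ⊢
  rw [← h13]
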